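-- pv_equiv track=rewrite | github.com/DanielMagen/Project_Euler | Problem 98.py | get_map_of_word_to_digits
-- ===== SOURCE A (Python) =====
-- def str_to_list(string):
--     lis = []
--     for c in string:
--         lis.append(c)
--     return lis
--
-- def get_map_of_word_to_digits(word, num):
--     """
--     if there is no valid map it returns none
--     it assumes that the word and number has the same length
--     """
--     word_char_list = str_to_list(word)
--     num_digit_list = str_to_list(str(num))
--     word_to_digits = {}
--     digits_to_word = {}
--
--     for i in range(len(word_char_list)):
--         current_char = word_char_list[i]
--         current_digit = num_digit_list[i]
--         if current_char in word_to_digits: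
--             if word_to_digits[current_char] != current_digit:
--                 return None
--         else:
--             if current_digit in digits_to_word:
--                 return None
--
--             word_to_digits[current_char] = current_digit
--             digits_to_word[current_digit] = current_char
--
--     return word_to_digits
-- ===== SOURCE B (Python) =====
-- def get_map_of_word_to_digits(word, num):
--     """
--     Validate by comparing equality patterns of positions pairwise:
--     a consistent bijective mapping exists iff for all positions i < j,
--     word[i] == word[j] holds exactly when the digits at i and j are equal.
--     No mapping is consulted during validation; the dict is built only at the end.
--     """
--     pairs = list(zip(word, str(num)))
--     n = len(pairs)
--     for i in range(n):
--         for j in range(i + 1, n):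
--             if (pairs[i][0] == pairs[j][0]) != (pairs[i][1] == pairs[j][1]):
--                 return None
--     return dict(pairs)
-- ===== Notes on version B (the rewrite author's own statement) =====
-- stated objective: alternative
-- what changed: A runs one online index loop maintaining two mirror dicts (char->digit and digit->char) with early returns; B uses no auxiliary structure during validation at all: it checks pairwise that the equality pattern of word positions matches the equality pattern of digit positions (for all i<j, word[i]==word[j] iff digit[i]==digit[j]), which holds iff a consistent bijection exists, and only then builds the dict in one shot with dict(pairs). Pre_ excludes exactly the inputs where A raises IndexError (word longer than str(num) with the zipped prefix still a consistent bijection). …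
import Mathlib
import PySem

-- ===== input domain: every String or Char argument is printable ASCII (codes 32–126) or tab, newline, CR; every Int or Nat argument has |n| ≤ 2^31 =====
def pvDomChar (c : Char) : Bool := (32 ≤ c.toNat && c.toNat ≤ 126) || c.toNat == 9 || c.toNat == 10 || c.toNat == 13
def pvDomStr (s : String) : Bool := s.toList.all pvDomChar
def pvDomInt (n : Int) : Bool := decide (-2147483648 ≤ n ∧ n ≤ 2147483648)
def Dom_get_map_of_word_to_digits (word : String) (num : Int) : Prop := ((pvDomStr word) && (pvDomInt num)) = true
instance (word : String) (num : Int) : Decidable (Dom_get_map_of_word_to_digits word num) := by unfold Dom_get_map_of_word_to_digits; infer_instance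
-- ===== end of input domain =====

-- B validates without any dict at all: it compares the equality patterns of positions pairwise
-- (word[i]==word[j] iff digit[i]==digit[j] for i<j) and builds the dict once at the end;
-- A instead maintains two mirror dicts online. B is O(n^2) where A is O(n) (not claimed faster).

-- ===== PORT A =====
-- one character of a Python string, as the 1-character str Python iteration yields
def pvS1 (c : Char) : String := String.ofList [c]

-- str_to_list: lis = []; for c in string: lis.append(c)
def str_to_list (s : String) : List String :=
  s.toList.foldl (fun lis c => lis ++ [pvS1 c]) []

-- the 'for i in range(len(word_char_list))' loop with its two dict states and early returns;
-- num_digit_list[i] out of range = IndexError: the port returns none there (excluded by Pre_)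
def pvALoop (wl nl : List String) (i : Nat)
    (w2d d2w : PySem.Dict String String) : Option (List (String × String)) :=
  if h : i < wl.length then
    let current_char := wl[i]
    match nl[i]? with
    | none => none
    | some current_digit =>
      if w2d.contains current_char then
        if w2d.getD current_char "" ≠ current_digit then none
        else pvALoop wl nl (i+1) w2d d2w
      else
        if d2w.contains current_digit then none
        else pvALoop wl nl (i+1) (w2d.insert current_char current_digit)
               (d2w.insert current_digit current_char)
  else some w2d.items
termination_by wl.length - i

def get_map_of_word_to_digits (word : String) (num : Int) : Option (List (String × String)) :=
  let word_char_list := str_to_list word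
  let num_digit_list := str_to_list (PySem.Int.toStr num)
  pvALoop word_char_list num_digit_list 0 PySem.Dict.empty PySem.Dict.empty

-- ===== PORT B =====
-- the nested 'for i in range(n): for j in range(i+1, n)' loops with early return None;
-- every index accessed is in range, so getD with a dummy default is exact for pairs[i]
def get_map_of_word_to_digits_alt (word : String) (num : Int) : Option (List (String × String)) :=
  let pairs := (word.toList.map pvS1).zip ((PySem.Int.toStr num).toList.map pvS1)
  let n := pairs.length
  if (List.range n).all (fun i =>
       (List.range' (i+1) (n - (i+1))).all (fun j =>
         ((pairs.getD i ("", "")).1 == (pairs.getD j ("", "")).1)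
           == ((pairs.getD i ("", "")).2 == (pairs.getD j ("", "")).2)))
  then some ((pairs.foldl (fun d p => d.insert p.1 p.2) PySem.Dict.empty).items)
  else none

-- ===== PRECONDITION & SPEC =====
-- the shared success condition: the char/digit pair list has matching equality patterns
def pvGoodP (ps : List (String × String)) : Prop :=
  ∀ p ∈ ps, ∀ q ∈ ps, (p.1 = q.1 ↔ p.2 = q.2)

-- Pre_ excludes exactly the inputs on which A raises IndexError: word longer than str(num)
-- while the zipped prefix is still a consistent bijection (otherwise A returns None earlier).
def Pre_get_map_of_word_to_digits (word : String) (num : Int) : Prop :=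
  word.toList.length ≤ (PySem.Int.toStr num).toList.length ∨
    ¬ pvGoodP ((word.toList.map pvS1).zip ((PySem.Int.toStr num).toList.map pvS1))
instance (word : String) (num : Int) : Decidable (Pre_get_map_of_word_to_digits word num) := by unfold Pre_get_map_of_word_to_digits pvGoodP; infer_instance
def pvWitness_get_map_of_word_to_digits : String × Int := ("ab", 13)

def Spec_get_map_of_word_to_digits (word : String) (num : Int) (out : Option (List (String × String))) : Prop := out = get_map_of_word_to_digits_alt word num
instance (word : String) (num : Int) (out : Option (List (String × String))) : Decidable (Spec_get_map_of_word_to_digits word num out) := by unfold Spec_get_map_of_word_to_digits; infer_instance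

-- ===== CLAIM (what is proved, stated in full; the proofs are below) =====
def Claim_equal_get_map_of_word_to_digits : Prop := ∀ (word : String) (num : Int), Dom_get_map_of_word_to_digits word num → Pre_get_map_of_word_to_digits word num → Spec_get_map_of_word_to_digits word num (get_map_of_word_to_digits word num)

-- ===== LEMMAS AND PROOFS =====

-- the pair-by-pair view of A's loop used by the proof
def pvLoopPairs (ps : List (String × String))
    (w2d d2w : PySem.Dict String String) : Option (List (String × String)) :=
  match ps with
  | [] => some w2d.items
  | p :: rest =>
    if w2d.contains p.1 then
      if w2d.getD p.1 "" ≠ p.2 then none else pvLoopPairs rest w2d d2w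
    else
      if d2w.contains p.2 then none
      else pvLoopPairs rest (w2d.insert p.1 p.2) (d2w.insert p.2 p.1)

-- every pair of ps is compatible with the accumulated state
def pvCompatP (ps : List (String × String)) (w2d d2w : PySem.Dict String String) : Prop :=
  ∀ p ∈ ps, w2d.get? p.1 = some p.2 ∨ (w2d.get? p.1 = none ∧ d2w.get? p.2 = none)

-- A's loop invariant: the two dicts are mutually inverse
def pvInv (w2d d2w : PySem.Dict String String) : Prop :=
  w2d.keys.Nodup ∧ d2w.keys.Nodup ∧ ∀ c d, w2d.get? c = some d ↔ d2w.get? d = some c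

lemma pvStrToList_eq_map (s : String) : str_to_list s = s.toList.map pvS1 :=
  (PySem.List.foldl_append_singleton_eq_map pvS1 s.toList []).trans (by simp)

lemma pvInsert_self_eq (d : PySem.Dict String String) (k v : String)
    (hnd : d.keys.Nodup) (hk : d.get? k = some v) : d.insert k v = d := by
  apply PySem.Dict.ext
  have hcont : d.contains k = true := by
    rw [PySem.Dict.contains_eq_isSome_get?, hk]; rfl
  rw [PySem.Dict.items_insert_of_contains d v hcont]
  conv_rhs => rw [← List.map_id d.items]
  apply List.map_congr_left
  intro p hp
  by_cases hpk : p.1 = k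
  · have hmem : (p.1, p.2) ∈ d.items := hp
    have hget := PySem.Dict.get?_of_mem_items d hmem hnd
    rw [hpk, hk] at hget
    have hpv : p = (k, v) := by
      cases p with
      | mk a b => simp only [Prod.mk.injEq]; exact ⟨hpk, by injection hget with h; exact h.symm⟩
    simp [hpk, hpv]
  · simp [hpk]

lemma pvALoop_eq (wl nl : List String) (hlen : wl.length ≤ nl.length) :
    ∀ n i w2d d2w, wl.length - i ≤ n →
      pvALoop wl nl i w2d d2w = pvLoopPairs ((wl.zip nl).drop i) w2d d2w := by
  intro n
  induction n with
  | zero =>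
    intro i w2d d2w hn
    have hge : ¬ i < wl.length := by omega
    have hdrop : ((wl.zip nl).drop i) = [] :=
      List.drop_eq_nil_of_le (by rw [List.length_zip]; omega)
    unfold pvALoop
    rw [dif_neg hge, hdrop]
    rfl
  | succ n ih =>
    intro i w2d d2w hn
    by_cases h : i < wl.length
    · have hz : i < (wl.zip nl).length := by rw [List.length_zip]; omega
      have hni : i < nl.length := lt_of_lt_of_le h hlen
      rw [List.drop_eq_getElem_cons hz]
      unfold pvALoop
      rw [dif_pos h]
      simp only [List.getElem_zip, List.getElem?_eq_getElem hni]
      by_cases hc : w2d.contains wl[i]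
      · by_cases hne : w2d.getD wl[i] "" ≠ nl[i]
        · simp [pvLoopPairs, hc, hne]
        · simp only [pvLoopPairs, hc, hne, if_true, if_false, ite_false, ite_true]
          simpa [hc, hne] using ih (i+1) w2d d2w (by omega)
      · by_cases hd : d2w.contains nl[i]
        · simp [pvLoopPairs, hc, hd]
        · simp only [pvLoopPairs, hc, hd]
          simpa [hc, hd] using ih (i+1) (w2d.insert wl[i] nl[i]) (d2w.insert nl[i] wl[i]) (by omega)
    · have hdrop : ((wl.zip nl).drop i) = [] :=
        List.drop_eq_nil_of_le (by rw [List.length_zip]; omega)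
      unfold pvALoop
      rw [dif_neg h, hdrop]
      rfl

-- A's index loop returns none as soon as its pair-by-pair view does (no length hypothesis:
-- when the digits run out first the port's none matches, since the pair view already failed)
lemma pvALoop_none (wl nl : List String) :
    ∀ n i w2d d2w, wl.length - i ≤ n →
      pvLoopPairs ((wl.zip nl).drop i) w2d d2w = none →
      pvALoop wl nl i w2d d2w = none := by
  intro n
  induction n with
  | zero =>
    intro i w2d d2w hn hnone
    have hge : ¬ i < wl.length := by omega
    have hdrop : (wl.zip nl).drop i = [] :=
      List.drop_eq_nil_of_le (by rw [List.length_zip]; omega)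
    rw [hdrop] at hnone
    exact absurd hnone (by simp [pvLoopPairs])
  | succ n ih =>
    intro i w2d d2w hn hnone
    by_cases h : i < wl.length
    · by_cases h2 : i < nl.length
      · have hz : i < (wl.zip nl).length := by rw [List.length_zip]; omega
        rw [List.drop_eq_getElem_cons hz, List.getElem_zip] at hnone
        unfold pvALoop
        rw [dif_pos h]
        simp only [List.getElem?_eq_getElem h2]
        by_cases hc : w2d.contains wl[i]
        · by_cases hne : w2d.getD wl[i] "" ≠ nl[i]
          · simp [hc, hne]
          · simp only [pvLoopPairs, hc, hne, if_true, ne_eq, not_false_eq_true, ite_true,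
              ite_false] at hnone
            simp only [hc, hne, if_true, ne_eq, ite_false, ite_true]
            simpa [hc, hne] using ih (i+1) w2d d2w (by omega) (by simpa [hc, hne] using hnone)
        · by_cases hd : d2w.contains nl[i]
          · simp [hc, hd]
          · simp only [pvLoopPairs, hc, hd, Bool.false_eq_true, if_false] at hnone
            simpa [hc, hd] using ih (i+1) (w2d.insert wl[i] nl[i]) (d2w.insert nl[i] wl[i])
              (by omega) hnone
      · unfold pvALoop
        rw [dif_pos h]
        have hnl : nl[i]? = none := by
          rw [List.getElem?_eq_none_iff]; omega
        simp [hnl]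
    · have hdrop : (wl.zip nl).drop i = [] :=
        List.drop_eq_nil_of_le (by rw [List.length_zip]; omega)
      rw [hdrop] at hnone
      exact absurd hnone (by simp [pvLoopPairs])

lemma pvE1 (p : String × String) (rest : List (String × String))
    (w2d d2w : PySem.Dict String String) (hInv : pvInv w2d d2w)
    (hp : w2d.get? p.1 = some p.2) :
    (pvGoodP (p :: rest) ∧ pvCompatP (p :: rest) w2d d2w) ↔
    (pvGoodP rest ∧ pvCompatP rest w2d d2w) := by
  obtain ⟨hnw, hnd, hR⟩ := hInv
  constructor
  · rintro ⟨hg, hcp⟩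
    exact ⟨fun a ha b hb => hg a (List.mem_cons_of_mem _ ha) b (List.mem_cons_of_mem _ hb),
           fun a ha => hcp a (List.mem_cons_of_mem _ ha)⟩
  · rintro ⟨hg, hcp⟩
    have key : ∀ q ∈ rest, (p.1 = q.1 ↔ p.2 = q.2) := by
      intro q hq
      rcases hcp q hq with hs | ⟨h1, h2⟩
      · have d1 := (hR p.1 p.2).1 hp
        have d2 := (hR q.1 q.2).1 hs
        constructor
        · intro h
          rw [h] at hp; rw [hs] at hp
          exact (Option.some.inj hp).symm
        · intro h
          rw [h] at d1; rw [d2] at d1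
          exact (Option.some.inj d1).symm
      · constructor
        · intro h
          rw [h] at hp; rw [h1] at hp
          simp at hp
        · intro h
          have d1 := (hR p.1 p.2).1 hp
          rw [h] at d1; rw [h2] at d1
          simp at d1
    constructor
    · intro a ha b hb
      rcases List.mem_cons.mp ha with rfl | ha' <;> rcases List.mem_cons.mp hb with rfl | hb'
      · exact ⟨fun _ => rfl, fun _ => rfl⟩
      · exact key b hb'
      · exact ⟨fun h => ((key a ha').mp h.symm).symm, fun h => ((key a ha').mpr h.symm).symm⟩
      · exact hg a ha' b hb'
    · intro a ha
      rcases List.mem_cons.mp ha with rfl | ha'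
      · exact Or.inl hp
      · exact hcp a ha'

lemma pvE2 (p : String × String) (rest : List (String × String))
    (w2d d2w : PySem.Dict String String) (hInv : pvInv w2d d2w)
    (hw : w2d.get? p.1 = none) (hd : d2w.get? p.2 = none) :
    (pvGoodP (p :: rest) ∧ pvCompatP (p :: rest) w2d d2w) ↔
    (pvGoodP rest ∧ pvCompatP rest (w2d.insert p.1 p.2) (d2w.insert p.2 p.1)) := by
  obtain ⟨hnw, hnd, hR⟩ := hInv
  constructor
  · rintro ⟨hg, hcp⟩
    refine ⟨fun a ha b hb => hg a (List.mem_cons_of_mem _ ha) b (List.mem_cons_of_mem _ hb), ?_⟩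
    intro q hq
    have hq' := List.mem_cons_of_mem p hq
    have hpq := hg p (List.mem_cons_self) q hq'
    rcases hcp q hq' with hs | ⟨h1, h2⟩
    · have hqp1 : q.1 ≠ p.1 := by intro h; rw [h, hw] at hs; cases hs
      left; rw [PySem.Dict.get?_insert, if_neg hqp1]; exact hs
    · by_cases hqp1 : q.1 = p.1
      · have hqp2 : q.2 = p.2 := (hpq.mp hqp1.symm).symm
        left; rw [PySem.Dict.get?_insert, if_pos hqp1, hqp2]
      · have hqp2 : q.2 ≠ p.2 := fun h => hqp1 ((hpq.mpr h.symm).symm)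
        right
        rw [PySem.Dict.get?_insert, if_neg hqp1, PySem.Dict.get?_insert, if_neg hqp2]
        exact ⟨h1, h2⟩
  · rintro ⟨hg, hcp⟩
    have key : ∀ q ∈ rest, ((p.1 = q.1 ↔ p.2 = q.2) ∧
        (w2d.get? q.1 = some q.2 ∨ (w2d.get? q.1 = none ∧ d2w.get? q.2 = none))) := by
      intro q hq
      rcases hcp q hq with hs | ⟨h1, h2⟩
      · rw [PySem.Dict.get?_insert] at hs
        by_cases hqp1 : q.1 = p.1
        · rw [if_pos hqp1] at hs
          injection hs with hs'
          constructor
          · exact ⟨fun _ => hs', fun _ => hqp1.symm⟩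
          · right; rw [hqp1, ← hs']; exact ⟨hw, hd⟩
        · rw [if_neg hqp1] at hs
          have hqp2 : q.2 ≠ p.2 := by
            intro h
            have := (hR q.1 q.2).1 hs
            rw [h, hd] at this; cases this
          exact ⟨⟨fun h => absurd h.symm hqp1, fun h => absurd h.symm hqp2⟩, Or.inl hs⟩
      · rw [PySem.Dict.get?_insert] at h1 h2
        have hqp1 : q.1 ≠ p.1 := by
          intro h; rw [if_pos h] at h1; cases h1
        have hqp2 : q.2 ≠ p.2 := by
          intro h; rw [if_pos h] at h2; cases h2
        rw [if_neg hqp1] at h1; rw [if_neg hqp2] at h2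
        exact ⟨⟨fun h => absurd h.symm hqp1, fun h => absurd h.symm hqp2⟩, Or.inr ⟨h1, h2⟩⟩
    constructor
    · intro a ha b hb
      rcases List.mem_cons.mp ha with rfl | ha' <;> rcases List.mem_cons.mp hb with rfl | hb'
      · exact ⟨fun _ => rfl, fun _ => rfl⟩
      · exact (key b hb').1
      · have := (key a ha').1
        exact ⟨fun h => (this.mp h.symm).symm, fun h => (this.mpr h.symm).symm⟩
      · exact hg a ha' b hb'
    · intro a ha
      rcases List.mem_cons.mp ha with rfl | ha'
      · exact Or.inr ⟨hw, hd⟩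
      · exact (key a ha').2

lemma pvE3 (p : String × String) (w2d d2w : PySem.Dict String String)
    (hInv : pvInv w2d d2w) (hw : w2d.get? p.1 = none) (hd : d2w.get? p.2 = none) :
    pvInv (w2d.insert p.1 p.2) (d2w.insert p.2 p.1) := by
  obtain ⟨hnw, hnd, hR⟩ := hInv
  refine ⟨PySem.Dict.nodup_keys_insert _ _ _ hnw, PySem.Dict.nodup_keys_insert _ _ _ hnd, ?_⟩
  intro c d0
  rw [PySem.Dict.get?_insert, PySem.Dict.get?_insert]
  by_cases hc : c = p.1 <;> by_cases hd0 : d0 = p.2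
  · rw [if_pos hc, if_pos hd0, hc, hd0]; simp
  · rw [if_pos hc, if_neg hd0]
    constructor
    · intro h; injection h with h'; exact absurd h'.symm hd0
    · intro h
      have := (hR c d0).2 h
      rw [hc, hw] at this; cases this
  · rw [if_neg hc, if_pos hd0]
    constructor
    · intro h
      have := (hR c d0).1 h
      rw [hd0, hd] at this; cases this
    · intro h; injection h with h'; exact absurd h'.symm hc
  · rw [if_neg hc, if_neg hd0]; exact hR c d0

lemma pvLoopPairs_some (ps : List (String × String)) :
    ∀ w2d d2w, pvInv w2d d2w → pvGoodP ps → pvCompatP ps w2d d2w →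
      pvLoopPairs ps w2d d2w = some ((ps.foldl (fun d p => d.insert p.1 p.2) w2d).items) := by
  induction ps with
  | nil => intro w2d d2w _ _ _; rfl
  | cons p rest ih =>
    intro w2d d2w hInv hG hC
    rcases hC p (List.mem_cons_self) with hs | ⟨hw, hd⟩
    · have hcont : w2d.contains p.1 = true := by
        rw [PySem.Dict.contains_eq_isSome_get?, hs]; rfl
      have hgd : w2d.getD p.1 "" = p.2 := PySem.Dict.getD_of_get?_eq_some _ _ hs
      have heq := pvInsert_self_eq w2d p.1 p.2 hInv.1 hs
      obtain ⟨hG', hC'⟩ := (pvE1 p rest w2d d2w hInv hs).mp ⟨hG, hC⟩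
      simp only [pvLoopPairs, hcont, hgd, if_true, ne_eq, not_true_eq_false, ite_false,
        ite_true, List.foldl_cons, heq]
      exact ih w2d d2w hInv hG' hC'
    · have hcw : w2d.contains p.1 = false := by
        rw [PySem.Dict.contains_eq_isSome_get?, hw]; rfl
      have hcd : d2w.contains p.2 = false := by
        rw [PySem.Dict.contains_eq_isSome_get?, hd]; rfl
      obtain ⟨hG', hC'⟩ := (pvE2 p rest w2d d2w hInv hw hd).mp ⟨hG, hC⟩
      simp only [pvLoopPairs, hcw, hcd, Bool.false_eq_true, if_false, List.foldl_cons]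
      exact ih _ _ (pvE3 p w2d d2w hInv hw hd) hG' hC'

lemma pvLoopPairs_none (ps : List (String × String)) :
    ∀ w2d d2w, pvInv w2d d2w → ¬(pvGoodP ps ∧ pvCompatP ps w2d d2w) →
      pvLoopPairs ps w2d d2w = none := by
  induction ps with
  | nil =>
    intro w2d d2w _ hn
    exact absurd ⟨fun p hp => absurd hp (List.not_mem_nil), fun p hp => absurd hp (List.not_mem_nil)⟩ hn
  | cons p rest ih =>
    intro w2d d2w hInv hn
    by_cases hs : w2d.get? p.1 = some p.2
    · have hcont : w2d.contains p.1 = true := by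
        rw [PySem.Dict.contains_eq_isSome_get?, hs]; rfl
      have hgd : w2d.getD p.1 "" = p.2 := PySem.Dict.getD_of_get?_eq_some _ _ hs
      simp only [pvLoopPairs, hcont, hgd, if_true, ne_eq, not_true_eq_false, ite_false, ite_true]
      exact ih w2d d2w hInv (fun hgc => hn ((pvE1 p rest w2d d2w hInv hs).mpr hgc))
    · cases hq : w2d.get? p.1 with
      | some v =>
        have hcont : w2d.contains p.1 = true := by
          rw [PySem.Dict.contains_eq_isSome_get?, hq]; rfl
        have hgd : w2d.getD p.1 "" = v := PySem.Dict.getD_of_get?_eq_some _ _ hq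
        have hvne : v ≠ p.2 := fun h => hs (h ▸ hq)
        simp [pvLoopPairs, hcont, hgd, hvne]
      | none =>
        by_cases hd : d2w.get? p.2 = none
        · have hcw : w2d.contains p.1 = false := by
            rw [PySem.Dict.contains_eq_isSome_get?, hq]; rfl
          have hcd : d2w.contains p.2 = false := by
            rw [PySem.Dict.contains_eq_isSome_get?, hd]; rfl
          simp only [pvLoopPairs, hcw, hcd, Bool.false_eq_true, if_false]
          exact ih _ _ (pvE3 p w2d d2w hInv hq hd)
            (fun hgc => hn ((pvE2 p rest w2d d2w hInv hq hd).mpr hgc))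
        · have hcw : w2d.contains p.1 = false := by
            rw [PySem.Dict.contains_eq_isSome_get?, hq]; rfl
          have hcd : d2w.contains p.2 = true := by
            rw [PySem.Dict.contains_eq_isSome_get?]
            cases h : d2w.get? p.2 with
            | none => exact absurd h hd
            | some _ => rfl
          simp [pvLoopPairs, hcw, hcd]

-- B's pairwise check over i < j is exactly pvGoodP
lemma pvCheckAll_iff (ps : List (String × String)) :
    ((List.range ps.length).all (fun i =>
       (List.range' (i+1) (ps.length - (i+1))).all (fun j =>
         ((ps.getD i ("", "")).1 == (ps.getD j ("", "")).1)
           == ((ps.getD i ("", "")).2 == (ps.getD j ("", "")).2))) = true) ↔ pvGoodP ps := by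
  simp only [List.all_eq_true, List.mem_range, List.mem_range'_1]
  constructor
  · intro h p hp q hq
    obtain ⟨i, hi, rfl⟩ := List.mem_iff_getElem.mp hp
    obtain ⟨j, hj, rfl⟩ := List.mem_iff_getElem.mp hq
    have key : ∀ a b : Nat, (ha : a < ps.length) → (hb : b < ps.length) → a < b →
        (ps[a].1 = ps[b].1 ↔ ps[a].2 = ps[b].2) := by
      intro a b ha hb hab
      have hb' := h a ha b ⟨by omega, by omega⟩
      rw [List.getD_eq_getElem?_getD, List.getD_eq_getElem?_getD,
        List.getElem?_eq_getElem ha, List.getElem?_eq_getElem hb] at hb'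
      simp only [Option.getD_some, beq_iff_eq] at hb'
      constructor
      · intro h'
        have : (ps[a].1 == ps[b].1) = true := beq_iff_eq.mpr h'
        rw [hb'] at this
        exact beq_iff_eq.mp this
      · intro h'
        have : (ps[a].2 == ps[b].2) = true := beq_iff_eq.mpr h'
        rw [← hb'] at this
        exact beq_iff_eq.mp this
    rcases lt_trichotomy i j with hij | hij | hij
    · exact key i j hi hj hij
    · subst hij; exact ⟨fun _ => rfl, fun _ => rfl⟩
    · have := key j i hj hi hij
      exact ⟨fun h' => (this.mp h'.symm).symm, fun h' => (this.mpr h'.symm).symm⟩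
  · intro hg i hi j hj
    have hj' : j < ps.length := by omega
    have hiff := hg ps[i] (List.getElem_mem hi) ps[j] (List.getElem_mem hj')
    rw [List.getD_eq_getElem?_getD, List.getD_eq_getElem?_getD,
      List.getElem?_eq_getElem hi, List.getElem?_eq_getElem hj']
    simp only [Option.getD_some, beq_iff_eq]
    by_cases h1 : ps[i].1 = ps[j].1
    · simp [h1, hiff.mp h1]
    · have h2 : ¬ ps[i].2 = ps[j].2 := fun h2 => h1 (hiff.mpr h2)
      simp [h1, h2]

lemma pvAlt_some (word : String) (num : Int)
    (h : pvGoodP ((word.toList.map pvS1).zip ((PySem.Int.toStr num).toList.map pvS1))) :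
    get_map_of_word_to_digits_alt word num =
      some ((((word.toList.map pvS1).zip ((PySem.Int.toStr num).toList.map pvS1)).foldl
        (fun d p => d.insert p.1 p.2) PySem.Dict.empty).items) := by
  simp only [get_map_of_word_to_digits_alt]
  rw [if_pos ((pvCheckAll_iff _).mpr h)]

lemma pvAlt_none (word : String) (num : Int)
    (h : ¬ pvGoodP ((word.toList.map pvS1).zip ((PySem.Int.toStr num).toList.map pvS1))) :
    get_map_of_word_to_digits_alt word num = none := by
  simp only [get_map_of_word_to_digits_alt]
  rw [if_neg (fun hc => h ((pvCheckAll_iff _).mp hc))]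

-- ===== VERDICT (by name: the statement is the Claim_ definition above) =====
theorem get_map_of_word_to_digits_spec : Claim_equal_get_map_of_word_to_digits := by
  intro word num _hdom hpre
  unfold Spec_get_map_of_word_to_digits
  unfold Pre_get_map_of_word_to_digits at hpre
  have hwl := pvStrToList_eq_map word
  have hnl := pvStrToList_eq_map (PySem.Int.toStr num)
  have hInv : pvInv (PySem.Dict.empty : PySem.Dict String String) PySem.Dict.empty := by
    refine ⟨by simp [pysem], by simp [pysem], ?_⟩
    intro c d; simp [pysem]
  set ps := (word.toList.map pvS1).zip ((PySem.Int.toStr num).toList.map pvS1) with hps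
  have hzip : (str_to_list word).zip (str_to_list (PySem.Int.toStr num)) = ps := by
    rw [hwl, hnl]
  show get_map_of_word_to_digits word num = _
  unfold get_map_of_word_to_digits
  by_cases hG : pvGoodP ps
  · rcases hpre with hlen | hbad
    · have hlen' : (str_to_list word).length ≤ (str_to_list (PySem.Int.toStr num)).length := by
        rw [hwl, hnl]; simpa using hlen
      rw [pvALoop_eq (str_to_list word) (str_to_list (PySem.Int.toStr num)) hlen'
        (str_to_list word).length 0 PySem.Dict.empty PySem.Dict.empty (by omega),
        List.drop_zero, hzip,
        pvLoopPairs_some ps _ _ hInv hG (fun p _ => Or.inr (by simp [pysem])),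
        pvAlt_some word num hG]
    · exact absurd hG hbad
  · have hnone : pvLoopPairs ps PySem.Dict.empty PySem.Dict.empty = none :=
      pvLoopPairs_none ps _ _ hInv (fun hgc => hG hgc.1)
    rw [pvALoop_none (str_to_list word) (str_to_list (PySem.Int.toStr num))
        (str_to_list word).length 0 PySem.Dict.empty PySem.Dict.empty (by omega)
        (by rw [List.drop_zero, hzip]; exact hnone),
      pvAlt_none word num hG]
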